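-- pv_equiv track=rewrite | github.com/maahfuzdev/leetcode-solutions | Hard Problem/Dp/Count Good Integers on a Grid Path.py | countGoodIntegersOnPath
-- ===== SOURCE A (Python) =====
-- def countGoodIntegersOnPath(l, r, dirs):
--
--     a = [0] * 16
--     r1 = 0
--     c1 = 0
--     a[0] = 1
--
--     for c in dirs:
--         if c == "D":
--             r1 += 1
--         else:
--             c1 += 1
--         a[(r1 << 2) | c1] = 1
--
--     def calc(s):
--
--         dp_cache = [[[-1] * 10 for _ in range(16)] for _ in range(2)]
--
--         def dp(pos, is_less, last):
--             if pos == 16: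
--                 return 1
--
--             if is_less and dp_cache[1][pos][last] != -1:
--                 return dp_cache[1][pos][last]
--
--             limit = 9 if is_less else int(s[pos])
--
--             ans = 0
--
--             for i in range(limit + 1):
--
--                 if a[pos] and i < last:
--                     continue
--
--                 nxt_last = i if a[pos] else last
--                 nxt_less = is_less or (i < limit)
--
--                 ans += dp(pos + 1, nxt_less, nxt_last)
--
--             if is_less:
--                 dp_cache[1][pos][last] = ans
--
--             return ans
--
--         return dp(0, False, 0)
--
--     sL = str(l - 1).zfill(16)
--     sR = str(r).zfill(16)
--
--     return calc(sR) - calc(sL)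
-- ===== SOURCE B (Python) =====
-- def countGoodIntegersOnPath(l, r, dirs):
--
--     a = [0] * 16
--     r1 = 0
--     c1 = 0
--     a[0] = 1
--
--     for c in dirs:
--         if c == "D":
--             r1 += 1
--         else:
--             c1 += 1
--         a[(r1 << 2) | c1] = 1
--
--     # g[pos][last] = number of ways to fill positions pos..15 when the prefix is
--     # already strictly below the bound (the fully-free branch), built bottom-up.
--     g = [[1] * 10]
--     for pos in range(15, -1, -1):
--         prev = g[0]
--         row = []
--         for last in range(10):
--             tot = 0
--             for i in range(10):
--                 if a[pos]:
--                     if last <= i: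
--                         tot += prev[i]
--                 else:
--                     tot += prev[last]
--             row.append(tot)
--         g.insert(0, row)
--
--     def calc(s):
--         # walk the tight path left to right; digits below the bound digit drop
--         # into the free branch and are counted with g.
--         total = 0
--         last = 0
--         for pos in range(16):
--             d = int(s[pos])
--             row = g[pos + 1]
--             for i in range(d):
--                 if a[pos]:
--                     if last <= i:
--                         total += row[i]
--                 else:
--                     total += row[last]
--             if a[pos]:
--                 if d < last:
--                     return total
--                 last = d
--         return total + 1
--
--     sL = str(l - 1).zfill(16)
--     sR = str(r).zfill(16)
--
--     return calc(sR) - calc(sL)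
-- ===== Notes on version B (the rewrite author's own statement) =====
-- stated objective: alternative
-- what changed: A's memoized top-down recursive digit DP (dp(pos,is_less,last) with a cache) is replaced by a bottom-up table g[pos][last] for the fully-free branch plus an explicit left-to-right tight walk that sums g-entries for digits dropping below the bound; the path-marking loop and the zfill(16) boundaries are kept.
import Mathlib
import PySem

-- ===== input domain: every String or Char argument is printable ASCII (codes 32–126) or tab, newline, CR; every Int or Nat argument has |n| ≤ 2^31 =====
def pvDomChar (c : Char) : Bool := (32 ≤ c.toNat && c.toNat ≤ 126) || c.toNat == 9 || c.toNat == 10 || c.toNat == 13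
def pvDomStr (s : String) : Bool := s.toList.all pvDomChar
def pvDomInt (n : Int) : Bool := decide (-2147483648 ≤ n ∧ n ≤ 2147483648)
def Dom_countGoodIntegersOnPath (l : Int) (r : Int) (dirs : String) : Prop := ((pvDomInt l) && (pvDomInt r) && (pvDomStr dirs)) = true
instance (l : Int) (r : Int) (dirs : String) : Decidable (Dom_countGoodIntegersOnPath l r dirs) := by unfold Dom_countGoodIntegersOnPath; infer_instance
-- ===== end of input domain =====

-- B replaces A's memoized recursive digit DP by a bottom-up free-branch table plus a
-- left-to-right tight walk (alternative decomposition; same asymptotic cost).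


-- ===== PORT A =====

-- the shared a[]-marking loop (identical in Source A and Source B): a = [0]*16; a[0] = 1; for c in dirs: ...
-- List.set is a no-op where Python's a[idx] = 1 raises IndexError (idx ≥ 16); Pre_ excludes those dirs.
def pvMark (dirs : List Char) : List Int :=
  (dirs.foldl
    (fun (st : List Int × Nat × Nat) c =>
      let r1 := if c = 'D' then st.2.1 + 1 else st.2.1
      let c1 := if c = 'D' then st.2.2 else st.2.2 + 1
      (st.1.set ((r1 <<< 2) ||| c1) 1, r1, c1))
    ((List.replicate 16 (0 : Int)).set 0 1, 0, 0)).1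

-- int(s[pos]) for a digit character; Pre_ guarantees every accessed character is a digit
-- (l ≥ 1 and r ≥ 0, so str(...).zfill(16) is all digits), where this is exact.
def pvDigit (c : Char) : Int := (c.toNat : Int) - 48

-- dp with the memo cache threaded through; the cache is dp_cache[1] modelled as a function
-- table (plane dp_cache[0] of the Python cache is never read or written).  s[pos] is read with
-- getD (in range on Pre_: the zfilled string has length 16).  fuel = 16 - pos throughout
-- (the fuel-0 branch is unreachable from the call in pvCalcA).
-- dp_cache[1][pos][last] = v  (function-table update)
def pvCUpd (c : Nat → Int → Int) (pos : Nat) (last : Int) (v : Int) : Nat → Int → Int :=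
  fun p l => if p = pos ∧ l = last then v else c p l

def pvDpA (a : List Int) (s : List Char) :
    Nat → Nat → Bool → Int → (Nat → Int → Int) → Int × (Nat → Int → Int)
  | fuel, pos, isLess, last, cache =>
    if pos = 16 then (1, cache)
    else
      match fuel with
      | 0 => (0, cache)
      | fuel + 1 =>
        if isLess = true ∧ cache pos last ≠ -1 then (cache pos last, cache)
        else
          let limit : Int := if isLess then 9 else pvDigit (s.getD pos '0')
          let res := (List.range (limit.toNat + 1)).foldl
            (fun (st : Int × (Nat → Int → Int)) (i : Nat) =>
              if a.getD pos 0 ≠ 0 ∧ (i : Int) < last then st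
              else
                let r := pvDpA a s fuel (pos + 1) (isLess || decide ((i : Int) < limit))
                  (if a.getD pos 0 ≠ 0 then (i : Int) else last) st.2
                (st.1 + r.1, r.2))
            (0, cache)
          (res.1, if isLess then pvCUpd res.2 pos last res.1 else res.2)

def pvCalcA (a : List Int) (s : List Char) : Int :=
  (pvDpA a s 16 0 false 0 (fun _ _ => -1)).1

def countGoodIntegersOnPath (l : Int) (r : Int) (dirs : String) : Int :=
  let a := pvMark dirs.toList
  let sL := PySem.Chars.zfill (PySem.Int.toChars (l - 1)) 16
  let sR := PySem.Chars.zfill (PySem.Int.toChars r) 16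
  pvCalcA a sR - pvCalcA a sL

-- ===== PORT B =====

-- one row of the free-branch table: row for position pos computed from the row below (prev)
def pvGRow (a : List Int) (pos : Nat) (prev : List Int) : List Int :=
  (List.range 10).map (fun last =>
    (List.range 10).foldl
      (fun tot i =>
        if a.getD pos 0 ≠ 0 then (if last ≤ i then tot + prev.getD i 0 else tot)
        else tot + prev.getD last 0)
      0)

-- g built bottom-up: pvGBuild a k = rows for positions (16-k)..16 (Python's g.insert(0, row) loop)
def pvGBuild (a : List Int) : Nat → List (List Int)
  | 0 => [List.replicate 10 (1 : Int)]
  | k + 1 => pvGRow a (16 - (k + 1)) ((pvGBuild a k).headD []) :: pvGBuild a k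

-- the tight left-to-right walk of calc(s); fuel counts the remaining positions (16 - pos)
def pvWalkB (a : List Int) (g : List (List Int)) (s : List Char) :
    Nat → Nat → Int → Int → Int
  | 0, _, _, total => total + 1
  | fuel + 1, pos, last, total =>
    let d := pvDigit (s.getD pos '0')
    let row := g.getD (pos + 1) []
    let total' := (List.range d.toNat).foldl
      (fun tot (i : Nat) =>
        if a.getD pos 0 ≠ 0 then (if last ≤ (i : Int) then tot + row.getD i 0 else tot)
        else tot + row.getD last.toNat 0)
      total
    if a.getD pos 0 ≠ 0 then
      (if d < last then total' else pvWalkB a g s fuel (pos + 1) d total')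
    else pvWalkB a g s fuel (pos + 1) last total'

def pvCalcB (a : List Int) (g : List (List Int)) (s : List Char) : Int :=
  pvWalkB a g s 16 0 0 0

def countGoodIntegersOnPath_alt (l : Int) (r : Int) (dirs : String) : Int :=
  let a := pvMark dirs.toList
  let g := pvGBuild a 16
  let sL := PySem.Chars.zfill (PySem.Int.toChars (l - 1)) 16
  let sR := PySem.Chars.zfill (PySem.Int.toChars r) 16
  pvCalcB a g sR - pvCalcB a g sL

-- ===== PRECONDITION & SPEC =====

-- Pre_ excludes exactly the inputs on which A raises: l ≤ 0 or r < 0 give a '-' sign in the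
-- zfilled bound string and int('-') raises ValueError; more than 3 'D' moves or more than 15
-- non-'D' moves make some marking index (r1 << 2) | c1 reach 16 and a[...] raises IndexError.
def Pre_countGoodIntegersOnPath (l : Int) (r : Int) (dirs : String) : Prop :=
  1 ≤ l ∧ 0 ≤ r ∧ PySem.Str.count dirs "D" ≤ 3 ∧
    dirs.toList.length - PySem.Str.count dirs "D" ≤ 15
instance (l : Int) (r : Int) (dirs : String) : Decidable (Pre_countGoodIntegersOnPath l r dirs) := by
  unfold Pre_countGoodIntegersOnPath; infer_instance

def pvWitness_countGoodIntegersOnPath : Int × Int × String := (1, 100, "DR")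

def Spec_countGoodIntegersOnPath (l : Int) (r : Int) (dirs : String) (out : Int) : Prop := out = countGoodIntegersOnPath_alt l r dirs
instance (l : Int) (r : Int) (dirs : String) (out : Int) : Decidable (Spec_countGoodIntegersOnPath l r dirs out) := by unfold Spec_countGoodIntegersOnPath; infer_instance

-- ===== CLAIM (what is proved, stated in full; the proofs are below) =====
def Claim_equal_countGoodIntegersOnPath : Prop := ∀ (l : Int) (r : Int) (dirs : String), Dom_countGoodIntegersOnPath l r dirs → Pre_countGoodIntegersOnPath l r dirs → Spec_countGoodIntegersOnPath l r dirs (countGoodIntegersOnPath l r dirs)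

-- ===== LEMMAS AND PROOFS =====

-- pure (cache-free) version of A's dp, used only in the proofs
def dpP (a : List Int) (s : List Char) : Nat → Nat → Bool → Int → Int
  | fuel, pos, isLess, last =>
    if pos = 16 then 1
    else
      match fuel with
      | 0 => 0
      | fuel + 1 =>
        let limit : Int := if isLess then 9 else pvDigit (s.getD pos '0')
        (List.range (limit.toNat + 1)).foldl
          (fun ans (i : Nat) =>
            if a.getD pos 0 ≠ 0 ∧ (i : Int) < last then ans
            else ans + dpP a s fuel (pos + 1) (isLess || decide ((i : Int) < limit))
              (if a.getD pos 0 ≠ 0 then (i : Int) else last))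
          0

def pvValid (a : List Int) (s : List Char) (c : Nat → Int → Int) : Prop :=
  ∀ p l, c p l ≠ -1 → c p l = dpP a s (16 - p) p true l

lemma pvFoldlSim {σ : Type} (f : Int × σ → Nat → Int × σ) (g : Int → Nat → Int) (V : σ → Prop)
    (h : ∀ ans c i, V c → (f (ans, c) i).1 = g ans i ∧ V (f (ans, c) i).2) :
    ∀ (ℓ : List Nat) (ans : Int) (c : σ), V c →
      (ℓ.foldl f (ans, c)).1 = ℓ.foldl g ans ∧ V (ℓ.foldl f (ans, c)).2 := by
  intro ℓ
  induction ℓ with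
  | nil => intro ans c hc; exact ⟨rfl, hc⟩
  | cons i t ih =>
    intro ans c hc
    have h1 := h ans c i hc
    have hf : f (ans, c) i = (g ans i, (f (ans, c) i).2) := by
      cases hfi : f (ans, c) i
      simp only [hfi] at h1 ⊢
      exact congrArg (·, _) h1.1
    rw [List.foldl_cons, hf]
    exact ih (g ans i) _ h1.2

lemma pvCUpd_eq (c : Nat → Int → Int) (pos : Nat) (last : Int) (v : Int) (p : Nat) (l : Int) :
    pvCUpd c pos last v p l = if p = pos ∧ l = last then v else c p l := rfl

lemma dpP_base (a : List Int) (s : List Char) (fuel : Nat) (less : Bool) (last : Int) :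
    dpP a s fuel 16 less last = 1 := by
  rw [dpP.eq_def]
  simp

lemma dpP_succ (a : List Int) (s : List Char) (n pos : Nat) (hp : pos ≠ 16)
    (less : Bool) (last : Int) :
    dpP a s (n + 1) pos less last =
      (List.range ((if less then (9 : Int) else pvDigit (s.getD pos '0')).toNat + 1)).foldl
        (fun ans (i : Nat) =>
          if a.getD pos 0 ≠ 0 ∧ (i : Int) < last then ans
          else ans + dpP a s n (pos + 1)
            (less || decide ((i : Int) < (if less then (9 : Int) else pvDigit (s.getD pos '0'))))
            (if a.getD pos 0 ≠ 0 then (i : Int) else last))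
        0 := by
  rw [dpP.eq_def]
  simp only [if_neg hp]

lemma pvDpA_eq (a : List Int) (s : List Char) :
    ∀ (n pos : Nat), n + pos = 16 → ∀ (less : Bool) (last : Int) (c : Nat → Int → Int),
      pvValid a s c →
      (pvDpA a s n pos less last c).1 = dpP a s n pos less last ∧
        pvValid a s (pvDpA a s n pos less last c).2 := by
  intro n
  induction n with
  | zero =>
    intro pos hnp less last c hc
    have hp : pos = 16 := by omega
    subst hp
    rw [pvDpA, dpP_base]
    simp [hc]
  | succ n ih =>
    intro pos hnp less last c hc
    have hp : pos ≠ 16 := by omega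
    have h16 : 16 - pos = n + 1 := by omega
    rw [pvDpA]
    simp only [if_neg hp]
    by_cases hhit : less = true ∧ c pos last ≠ -1
    · rw [if_pos hhit]
      obtain ⟨hl, hne⟩ := hhit
      subst hl
      have hthis := hc pos last hne
      rw [h16] at hthis
      exact ⟨hthis, hc⟩
    · rw [if_neg hhit]
      have hfold := pvFoldlSim
        (fun (st : Int × (Nat → Int → Int)) (i : Nat) =>
          if a.getD pos 0 ≠ 0 ∧ (i : Int) < last then st
          else
            let r := pvDpA a s n (pos + 1)
              (less || decide ((i : Int) < (if less then (9:Int) else pvDigit (s.getD pos '0'))))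
              (if a.getD pos 0 ≠ 0 then (i : Int) else last) st.2
            (st.1 + r.1, r.2))
        (fun ans (i : Nat) =>
          if a.getD pos 0 ≠ 0 ∧ (i : Int) < last then ans
          else ans + dpP a s n (pos + 1)
            (less || decide ((i : Int) < (if less then (9:Int) else pvDigit (s.getD pos '0'))))
            (if a.getD pos 0 ≠ 0 then (i : Int) else last))
        (pvValid a s)
        (by
          intro ans c' i hc'
          by_cases hskip : a.getD pos 0 ≠ 0 ∧ (i : Int) < last
          · simp only [if_pos hskip]
            exact ⟨by trivial, hc'⟩
          · simp only [if_neg hskip]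
            have hrec := ih (pos + 1) (by omega)
              (less || decide ((i : Int) < (if less then (9:Int) else pvDigit (s.getD pos '0'))))
              (if a.getD pos 0 ≠ 0 then (i : Int) else last) c' hc'
            exact ⟨by rw [hrec.1], hrec.2⟩)
        (List.range ((if less then (9:Int) else pvDigit (s.getD pos '0')).toNat + 1)) 0 c hc
      obtain ⟨hv, hcv⟩ := hfold
      have hvd : (List.foldl
          (fun (st : Int × (Nat → Int → Int)) (i : Nat) =>
            if a.getD pos 0 ≠ 0 ∧ (i : Int) < last then st
            else
              let r := pvDpA a s n (pos + 1)
                (less || decide ((i : Int) < (if less then (9:Int) else pvDigit (s.getD pos '0'))))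
                (if a.getD pos 0 ≠ 0 then (i : Int) else last) st.2
              (st.1 + r.1, r.2))
          (0, c)
          (List.range ((if less then (9:Int) else pvDigit (s.getD pos '0')).toNat + 1))).1
          = dpP a s (n + 1) pos less last := by
        rw [dpP_succ a s n pos hp less last]
        exact hv
      have hupd : ∀ (Y : Nat → Int → Int) (Z : Int), pvValid a s Y →
          Z = dpP a s (n + 1) pos true last → pvValid a s (pvCUpd Y pos last Z) := by
        intro Y Z hY hZ p l hne
        rw [pvCUpd_eq] at hne ⊢
        by_cases hpl : p = pos ∧ l = last
        · obtain ⟨he1, he2⟩ := hpl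
          subst he1; subst he2
          rw [if_pos ⟨rfl, rfl⟩] at hne ⊢
          rw [h16]
          exact hZ
        · rw [if_neg hpl] at hne ⊢
          exact hY p l hne
      refine ⟨hvd, ?_⟩
      cases less with
      | false => exact hcv
      | true => exact hupd _ _ hcv hvd

lemma pvGBuild_get (a : List Int) (s : List Char) :
    ∀ (k : Nat), k ≤ 16 → ∀ (j : Nat), j ≤ k → ∀ (lastN : Nat), lastN < 10 →
      ((pvGBuild a k).getD j []).getD lastN 0 =
        dpP a s (k - j) (16 - (k - j)) true (lastN : Int) := by
  intro k
  induction k with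
  | zero =>
    intro _ j hj lastN hlast
    interval_cases j
    simp [pvGBuild, hlast, dpP_base]
    interval_cases lastN <;> rfl
  | succ k ih =>
    intro hk j hj lastN hlast
    cases j with
    | succ j =>
      simp only [pvGBuild, List.getD_cons_succ, Nat.succ_sub_succ]
      exact ih (by omega) j (by omega) lastN hlast
    | zero =>
      have hk16 : k ≤ 16 := by omega
      have hpos : 16 - (k + 1) ≠ 16 := by omega
      have hpp : 16 - (k + 1) + 1 = 16 - k := by omega
      have hprev : ∀ i : Nat, i < 10 →
          ((pvGBuild a k).headD []).getD i 0 = dpP a s k (16 - k) true (i : Int) := by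
        intro i hi
        have hhead : (pvGBuild a k).headD [] = (pvGBuild a k).getD 0 [] := by
          cases k <;> rfl
        rw [hhead]
        simpa using ih hk16 0 (Nat.zero_le k) i hi
      simp only [pvGBuild, List.getD_cons_zero, Nat.sub_zero]
      -- reduce the map-getD to the function applied at lastN
      rw [pvGRow]
      rw [List.getD_eq_getElem?_getD, List.getElem?_map, List.getElem?_range hlast]
      simp only [Option.map_some, Option.getD_some]
      rw [dpP_succ a s k (16 - (k + 1)) hpos true (lastN : Int)]
      show _ = List.foldl _ 0 (List.range 10)
      apply PySem.List.foldl_congr_mem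
      intro acc i hi
      have hi10 : i < 10 := List.mem_range.mp hi
      by_cases ha : a.getD (16 - (k + 1)) 0 ≠ 0
      · rw [if_pos ha]
        by_cases hle : lastN ≤ i
        · rw [if_pos hle, if_neg (by push_cast; omega), if_pos ha, hpp, hprev i hi10,
            Bool.true_or]
        · rw [if_neg hle, if_pos (by refine ⟨ha, ?_⟩; omega)]
      · rw [if_neg ha, if_neg (by intro hcontra; exact ha hcontra.1), if_neg ha, hpp,
          hprev lastN hlast, Bool.true_or]

lemma pvWalkB_succ (a : List Int) (g : List (List Int)) (s : List Char)
    (n pos : Nat) (last total : Int) :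
    pvWalkB a g s (n + 1) pos last total =
      (if a.getD pos 0 ≠ 0 then
        (if pvDigit (s.getD pos '0') < last then
          (List.range (pvDigit (s.getD pos '0')).toNat).foldl
            (fun tot (i : Nat) =>
              if a.getD pos 0 ≠ 0 then
                (if last ≤ (i : Int) then tot + ((g.getD (pos + 1) []).getD i 0) else tot)
              else tot + ((g.getD (pos + 1) []).getD last.toNat 0))
            total
        else pvWalkB a g s n (pos + 1) (pvDigit (s.getD pos '0'))
          ((List.range (pvDigit (s.getD pos '0')).toNat).foldl
            (fun tot (i : Nat) =>
              if a.getD pos 0 ≠ 0 then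
                (if last ≤ (i : Int) then tot + ((g.getD (pos + 1) []).getD i 0) else tot)
              else tot + ((g.getD (pos + 1) []).getD last.toNat 0))
            total))
      else pvWalkB a g s n (pos + 1) last
        ((List.range (pvDigit (s.getD pos '0')).toNat).foldl
          (fun tot (i : Nat) =>
            if a.getD pos 0 ≠ 0 then
              (if last ≤ (i : Int) then tot + ((g.getD (pos + 1) []).getD i 0) else tot)
            else tot + ((g.getD (pos + 1) []).getD last.toNat 0))
          total)) := rfl

lemma pvWalk_eq (a : List Int) (s : List Char)
    (hdig : ∀ p : Nat, 0 ≤ pvDigit (s.getD p '0') ∧ pvDigit (s.getD p '0') ≤ 9) :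
    ∀ (n pos : Nat), n + pos = 16 → ∀ (last total : Int), 0 ≤ last → last < 10 →
      pvWalkB a (pvGBuild a 16) s n pos last total = total + dpP a s n pos false last := by
  intro n
  induction n with
  | zero =>
    intro pos hnp last total h0 h10
    have hpe : pos = 16 := by omega
    subst hpe
    rw [pvWalkB, dpP_base]
  | succ n ih =>
    intro pos hnp last total h0 h10
    have hp : pos ≠ 16 := by omega
    obtain ⟨hd0, hd9⟩ := hdig pos
    have hdn : ((pvDigit (s.getD pos '0')).toNat : Int) = pvDigit (s.getD pos '0') :=
      Int.toNat_of_nonneg hd0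
    have hrow : ∀ i : Nat, i < 10 →
        ((pvGBuild a 16).getD (pos + 1) []).getD i 0 = dpP a s n (pos + 1) true (i : Int) := by
      intro i hi
      have h1 : (16 : Nat) - (pos + 1) = n := by omega
      have h2 : (16 : Nat) - n = pos + 1 := by omega
      have h3 := pvGBuild_get a s 16 le_rfl (pos + 1) (by omega) i hi
      rw [h1, h2] at h3
      exact h3
    rw [pvWalkB_succ, dpP_succ a s n pos hp false last]
    simp only [Bool.false_eq_true, if_false, Bool.false_or]
    rw [PySem.List.foldl_congr_mem _
      _
      (fun tot (i : Nat) => tot +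
        (if a.getD pos 0 ≠ 0 then
          (if last ≤ (i : Int) then ((pvGBuild a 16).getD (pos + 1) []).getD i 0 else 0)
        else ((pvGBuild a 16).getD (pos + 1) []).getD last.toNat 0))
      total
      (by
        intro acc i _
        by_cases ha : a.getD pos 0 ≠ 0
        · by_cases hle : last ≤ (i : Int)
          · simp only [if_pos ha, if_pos hle]
          · simp only [if_pos ha, if_neg hle]; omega
        · simp only [if_neg ha])]
    rw [PySem.List.foldl_add]
    rw [PySem.List.foldl_congr_mem _
      _
      (fun ans (i : Nat) => ans +
        (if a.getD pos 0 ≠ 0 ∧ (i : Int) < last then 0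
         else dpP a s n (pos + 1) (decide ((i : Int) < pvDigit (s.getD pos '0')))
           (if a.getD pos 0 ≠ 0 then (i : Int) else last)))
      0
      (by
        intro acc i _
        by_cases hskip : a.getD pos 0 ≠ 0 ∧ (i : Int) < last
        · simp only [if_pos hskip]; omega
        · simp only [if_neg hskip])]
    rw [PySem.List.foldl_add, List.range_succ, List.map_append, List.sum_append]
    rw [List.map_congr_left (l := List.range (pvDigit (s.getD pos '0')).toNat)
      (f := fun (i : Nat) =>
        (if a.getD pos 0 ≠ 0 ∧ (i : Int) < last then 0
         else dpP a s n (pos + 1) (decide ((i : Int) < pvDigit (s.getD pos '0')))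
           (if a.getD pos 0 ≠ 0 then (i : Int) else last)))
      (g := fun (i : Nat) =>
        (if a.getD pos 0 ≠ 0 then
          (if last ≤ (i : Int) then ((pvGBuild a 16).getD (pos + 1) []).getD i 0 else 0)
        else ((pvGBuild a 16).getD (pos + 1) []).getD last.toNat 0))
      (by
        intro i hi
        have hilt : i < (pvDigit (s.getD pos '0')).toNat := List.mem_range.mp hi
        have hi10 : i < 10 := by omega
        have hlt : ((i : Int) < pvDigit (s.getD pos '0')) := by omega
        beta_reduce
        rw [decide_eq_true hlt]
        by_cases ha : a.getD pos 0 ≠ 0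
        · by_cases hle : last ≤ (i : Int)
          · rw [if_neg (by omega : ¬(a.getD pos 0 ≠ 0 ∧ (i : Int) < last)),
              if_pos ha, if_pos ha, if_pos hle, hrow i hi10]
          · rw [if_pos ⟨ha, by omega⟩, if_pos ha, if_neg hle]
        · rw [if_neg (fun hcon => ha hcon.1), if_neg ha, if_neg ha,
            hrow last.toNat (by omega), Int.toNat_of_nonneg h0])]
    simp only [List.map_cons, List.map_nil, List.sum_cons, List.sum_nil, add_zero, zero_add]
    by_cases ha : a.getD pos 0 ≠ 0
    · by_cases hdl : pvDigit (s.getD pos '0') < last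
      · rw [if_pos ha, if_pos hdl, if_pos ⟨ha, by rw [hdn]; exact hdl⟩]
        ring
      · rw [if_pos ha, if_neg hdl,
          if_neg (fun hcon => hdl (by rw [hdn] at hcon; exact hcon.2)),
          if_pos ha, hdn,
          (by simp : decide (pvDigit (s.getD pos '0') < pvDigit (s.getD pos '0')) = false),
          ih (pos + 1) (by omega) (pvDigit (s.getD pos '0')) _ hd0 (by omega)]
        ring
    · rw [if_neg ha, if_neg (fun hcon => ha hcon.1), if_neg ha, hdn,
        (by simp : decide (pvDigit (s.getD pos '0') < pvDigit (s.getD pos '0')) = false),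
        ih (pos + 1) (by omega) last _ h0 h10]
      ring

lemma pvToDigitsCore_bounds :
    ∀ (fuel n : Nat) (acc : List Char),
      (∀ c ∈ acc, 48 ≤ c.toNat ∧ c.toNat ≤ 57) →
      ∀ c ∈ Nat.toDigitsCore 10 fuel n acc, 48 ≤ c.toNat ∧ c.toNat ≤ 57 := by
  intro fuel
  induction fuel with
  | zero => intro n acc hacc c hc; exact hacc c hc
  | succ fuel ih =>
    intro n acc hacc c hc
    have hmod : n % 10 < 10 := Nat.mod_lt _ (by norm_num)
    have hdch : 48 ≤ (Nat.digitChar (n % 10)).toNat ∧ (Nat.digitChar (n % 10)).toNat ≤ 57 := by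
      set m := n % 10 with hm
      interval_cases m <;> decide
    rw [Nat.toDigitsCore] at hc
    by_cases hz : n / 10 = 0
    · rw [if_pos hz] at hc
      rcases List.mem_cons.mp hc with h | h
      · rw [h]; exact hdch
      · exact hacc c h
    · rw [if_neg hz] at hc
      refine ih (n / 10) _ ?_ c hc
      intro c' hc'
      rcases List.mem_cons.mp hc' with h | h
      · rw [h]; exact hdch
      · exact hacc c' h

lemma pvToDigitsCore_ne_nil :
    ∀ (fuel n : Nat) (acc : List Char), acc ≠ [] → Nat.toDigitsCore 10 fuel n acc ≠ [] := by
  intro fuel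
  induction fuel with
  | zero => intro n acc hacc; exact hacc
  | succ fuel ih =>
    intro n acc hacc
    rw [Nat.toDigitsCore]
    by_cases hz : n / 10 = 0
    · rw [if_pos hz]; exact List.cons_ne_nil _ _
    · rw [if_neg hz]; exact ih (n / 10) _ (List.cons_ne_nil _ _)

lemma pvToDigits_ne_nil (m : Nat) : Nat.toDigits 10 m ≠ [] := by
  rw [Nat.toDigits, Nat.toDigitsCore]
  by_cases hz : m / 10 = 0
  · rw [if_pos hz]; exact List.cons_ne_nil _ _
  · rw [if_neg hz]; exact pvToDigitsCore_ne_nil m (m / 10) _ (List.cons_ne_nil _ _)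

lemma pvZfillDigits (nn : Int) (hn : 0 ≤ nn) :
    ∀ c ∈ PySem.Chars.zfill (PySem.Int.toChars nn) 16, 48 ≤ c.toNat ∧ c.toNat ≤ 57 := by
  have hch : ∀ c ∈ PySem.Int.toChars nn, 48 ≤ c.toNat ∧ c.toNat ≤ 57 := by
    intro c hc
    simp only [PySem.Int.toChars, if_neg (not_lt.mpr hn)] at hc
    rw [Nat.toDigits] at hc
    exact pvToDigitsCore_bounds _ _ _ (by simp) c hc
  have hne : PySem.Int.toChars nn ≠ [] := by
    simp only [PySem.Int.toChars, if_neg (not_lt.mpr hn)]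
    exact pvToDigits_ne_nil _
  intro c hc
  rw [PySem.Chars.zfill.eq_def] at hc
  by_cases hlen : (16 : Int) ≤ ((PySem.Int.toChars nn).length : Int)
  · rw [if_pos hlen] at hc; exact hch c hc
  · rw [if_neg hlen] at hc
    cases hcs : PySem.Int.toChars nn with
    | nil => exact absurd hcs hne
    | cons c0 rest =>
      rw [hcs] at hc
      replace hc : c ∈ (if c0 = '+' ∨ c0 = '-' then
          c0 :: (List.replicate ((16 : Int).toNat - (c0 :: rest).length) '0' ++ rest)
        else List.replicate ((16 : Int).toNat - (c0 :: rest).length) '0' ++ c0 :: rest) := hc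
      have hc0 := hch c0 (by rw [hcs]; exact List.mem_cons_self)
      have hns : ¬(c0 = '+' ∨ c0 = '-') := by
        rintro (h | h) <;> (subst h; revert hc0; decide)
      rw [if_neg hns] at hc
      rcases List.mem_append.mp hc with h | h
      · rw [List.eq_of_mem_replicate h]; decide
      · exact hch c (by rw [hcs]; exact h)

-- ===== VERDICT (by name: the statement is the Claim_ definition above) =====
theorem countGoodIntegersOnPath_spec : Claim_equal_countGoodIntegersOnPath := by
  intro l r dirs _ hpre
  unfold Pre_countGoodIntegersOnPath at hpre
  obtain ⟨hl, hr, -, -⟩ := hpre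
  unfold Spec_countGoodIntegersOnPath
  show pvCalcA (pvMark dirs.toList) (PySem.Chars.zfill (PySem.Int.toChars r) 16) -
      pvCalcA (pvMark dirs.toList) (PySem.Chars.zfill (PySem.Int.toChars (l - 1)) 16) =
    pvCalcB (pvMark dirs.toList) (pvGBuild (pvMark dirs.toList) 16)
        (PySem.Chars.zfill (PySem.Int.toChars r) 16) -
      pvCalcB (pvMark dirs.toList) (pvGBuild (pvMark dirs.toList) 16)
        (PySem.Chars.zfill (PySem.Int.toChars (l - 1)) 16)
  have key : ∀ s : List Char, (∀ c ∈ s, 48 ≤ c.toNat ∧ c.toNat ≤ 57) →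
      pvCalcA (pvMark dirs.toList) s =
        pvCalcB (pvMark dirs.toList) (pvGBuild (pvMark dirs.toList) 16) s := by
    intro s hs
    have hdig : ∀ p : Nat, 0 ≤ pvDigit (s.getD p '0') ∧ pvDigit (s.getD p '0') ≤ 9 := by
      intro p
      have hmem : s.getD p '0' ∈ s ∨ s.getD p '0' = '0' := by
        by_cases hlen : p < s.length
        · left
          rw [List.getD_eq_getElem?_getD, List.getElem?_eq_getElem hlen]
          exact List.getElem_mem hlen
        · right
          rw [List.getD_eq_getElem?_getD, List.getElem?_eq_none (by omega)]
          rfl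
      rcases hmem with hm | he
      · have := hs _ hm
        unfold pvDigit
        omega
      · rw [he]; decide
    unfold pvCalcA pvCalcB
    have hA := (pvDpA_eq (pvMark dirs.toList) s 16 0 (by omega) false 0 (fun _ _ => -1)
      (fun p l h => absurd rfl h)).1
    rw [hA, pvWalk_eq (pvMark dirs.toList) s hdig 16 0 (by omega) 0 0 le_rfl (by norm_num)]
    ring
  rw [key _ (pvZfillDigits r hr), key _ (pvZfillDigits (l - 1) (by omega))]
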